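-- pv_equiv track=rewrite | github.com/RockPiryt/Graphs_Python | 4.graph_drirected.py | create_adjacency_matrix
-- ===== SOURCE A (Python) =====
-- def is_in_set(value, S):
--     """Sprawdza, czy dana wartość znajduje się w zbiorze S."""
--     return value in S
--
-- def create_adjacency_matrix(A, S):
--     """Tworzy macierz sąsiedztwa dla grafu skierowanego na podstawie zbiorów A i S."""
--     # A=[0 1 2 3 4]
--     # S=[-2 1 2 4]
--     n = len(A)
--
--     # Inicjalizuj pustą macierz sąsiedztwa zerami
--     adj_matrix = []
--     for i in range(n):
--         row = []
--         for j in range(n):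
--             row.append(0)
--         adj_matrix.append(row)
--
--     # Wypełnij macierz sąsiedztwa
--     for i in range(n):
--         for j in range(n):
--             # Unikaj pętli własnych
--             if i != j:
--                 # Oblicz różnicę y - x
--                 diff = A[j] - A[i]
--
--                 # Jeśli różnica znajduje się w zbiorze S, oznacz jako krawędź
--                 if is_in_set(diff, S):
--                     adj_matrix[i][j] = 1
--
--     return adj_matrix
-- ===== SOURCE B (Python) =====
-- def create_adjacency_matrix(A, S):
--     """Macierz sasiedztwa: krawedz i->j gdy A[j]-A[i] w S, bez petli wlasnych.
--     Zamiast skanu wszystkich par: indeks wartosc->pozycje, wypelnianie sterowane offsetami z S."""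
--     n = len(A)
--     # index: value -> all positions holding that value
--     pos = {}
--     for j, x in enumerate(A):
--         pos.setdefault(x, []).append(j)
--     adj_matrix = []
--     for i, x in enumerate(A):
--         row = [0] * n
--         for s in S:
--             for j in pos.get(x + s, []):
--                 if j != i:
--                     row[j] = 1
--         adj_matrix.append(row)
--     return adj_matrix
-- ===== Notes on version B (the rewrite author's own statement) =====
-- stated objective: faster
-- what changed: Replaces the all-pairs scan testing A[j]-A[i] in S by a value->positions index built once: each row is filled by looking up the positions of A[i]+s for each offset s in S, so the inner scan over all j and the per-pair membership test in S disappear.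
import Mathlib
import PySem

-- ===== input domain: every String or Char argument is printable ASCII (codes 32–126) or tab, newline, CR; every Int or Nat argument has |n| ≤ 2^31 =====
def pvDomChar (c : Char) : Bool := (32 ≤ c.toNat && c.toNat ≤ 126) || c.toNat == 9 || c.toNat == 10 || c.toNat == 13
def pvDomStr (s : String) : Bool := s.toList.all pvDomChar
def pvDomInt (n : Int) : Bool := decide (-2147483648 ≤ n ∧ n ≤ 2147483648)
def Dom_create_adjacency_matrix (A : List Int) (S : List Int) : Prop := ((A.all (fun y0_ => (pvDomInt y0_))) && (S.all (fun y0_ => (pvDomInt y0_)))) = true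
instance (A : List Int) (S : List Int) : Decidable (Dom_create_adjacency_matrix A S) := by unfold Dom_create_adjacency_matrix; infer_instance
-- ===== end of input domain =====

-- B replaces A's all-pairs scan (every (i,j) tested for A[j]-A[i] in S) by a value→positions
-- index built once, filling each row from the offsets in S; equivalence of the two is proved below.

-- ===== PORT A =====
def is_in_set (value : Int) (S : List Int) : Bool := S.contains value

def create_adjacency_matrix (A : List Int) (S : List Int) : List (List Int) :=
  let n : Int := PySem.List.len A
  -- initialize the empty adjacency matrix with zeros
  let adj_matrix : List (List Int) :=
    (PySem.List.pyRange 0 n 1).foldl (fun m _i =>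
      let row : List Int := (PySem.List.pyRange 0 n 1).foldl (fun r _j => r ++ [(0 : Int)]) []
      m ++ [row]) []
  -- fill the adjacency matrix
  (PySem.List.pyRange 0 n 1).foldl (fun m i =>
    (PySem.List.pyRange 0 n 1).foldl (fun m j =>
      if i ≠ j then
        if is_in_set (PySem.List.pyGetD A j 0 - PySem.List.pyGetD A i 0) S then
          PySem.List.pySetD m i (PySem.List.pySetD (PySem.List.pyGetD m i []) j 1)
        else m
      else m) m) adj_matrix

-- ===== PORT B =====
def create_adjacency_matrix_alt (A : List Int) (S : List Int) : List (List Int) :=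
  let n : Int := PySem.List.len A
  -- pos: value -> list of all positions holding that value
  let pos : PySem.Dict Int (List Int) :=
    (PySem.List.enumerate A 0).foldl
      (fun d p => PySem.Dict.modify d p.2 [] (fun l => l ++ [p.1])) PySem.Dict.empty
  (PySem.List.enumerate A 0).foldl (fun mat p =>
    let row0 : List Int := PySem.List.pyRepeat [(0 : Int)] n
    let row : List Int := S.foldl (fun r s =>
      (PySem.Dict.getD pos (p.2 + s) []).foldl (fun r j =>
        if j ≠ p.1 then PySem.List.pySetD r j 1 else r) r) row0
    mat ++ [row]) []

-- ===== PRECONDITION & SPEC =====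
def Spec_create_adjacency_matrix (A : List Int) (S : List Int) (out : List (List Int)) : Prop := out = create_adjacency_matrix_alt A S
instance (A : List Int) (S : List Int) (out : List (List Int)) : Decidable (Spec_create_adjacency_matrix A S out) := by unfold Spec_create_adjacency_matrix; infer_instance

-- ===== CLAIM (what is proved, stated in full; the proofs are below) =====
def Claim_equal_create_adjacency_matrix : Prop := ∀ (A : List Int) (S : List Int), Dom_create_adjacency_matrix A S → Spec_create_adjacency_matrix A S (create_adjacency_matrix A S)

-- ===== LEMMAS AND PROOFS =====

-- the common value both programs compute: entry (i,k) is 1 iff i ≠ k and A[k]-A[i] ∈ S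
def pvEntry (A S : List Int) (i k : Nat) : Int :=
  if i ≠ k ∧ (A.getD k 0 - A.getD i 0) ∈ S then 1 else 0

def pvSpec (A S : List Int) : List (List Int) :=
  (List.range A.length).map (fun i => (List.range A.length).map (fun k => pvEntry A S i k))

-- a loop that conditionally sets entries to 1
def pvFill (P : Int → Bool) (L : List Int) (r : List Int) : List Int :=
  L.foldl (fun r j => if P j then PySem.List.pySetD r j 1 else r) r
lemma pvSetD_nil (j : Int) (v : Int) : PySem.List.pySetD ([] : List Int) j v = [] := by
  simp [PySem.List.pySetD, PySem.List.pySet?]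
  cases PySem.List.pyIdx? 0 j <;> simp

lemma pvFill_getElem? (P : Int → Bool) (L : List Int) (hL : ∀ j ∈ L, 0 ≤ j) (r : List Int) (k : Nat) :
    (pvFill P L r)[k]? =
      if (∃ j ∈ L, P j = true ∧ j = (k : Int)) ∧ k < r.length then some (1 : Int) else r[k]? := by
  induction L generalizing r with
  | nil => simp [pvFill]
  | cons j L ih =>
    have hj : 0 ≤ j := hL j (by simp)
    have hL' : ∀ x ∈ L, 0 ≤ x := fun x hx => hL x (by simp [hx])
    simp only [pvFill, List.foldl_cons] at *
    rw [ih hL']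
    by_cases hPj : P j = true
    · simp only [hPj, if_true]
      rw [PySem.List.pySetD_of_nonneg _ _ hj]
      rw [List.length_set]
      by_cases hjk : j = (k : Int)
      · have htk : j.toNat = k := by omega
        by_cases hk : k < r.length
        · have hr : (r.set j.toNat 1)[k]? = some 1 := by
            rw [List.getElem?_set]; simp [htk, hk]
          rw [hjk] at hPj
          simp [hjk, hPj, hk, hr]
        · simp only [hk, and_false, if_false]
          rw [List.getElem?_set]
          simp [htk, hk]
      · have hr : (r.set j.toNat 1)[k]? = r[k]? := by
          rw [List.getElem?_set]
          have : j.toNat ≠ k := by omega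
          simp [this]
        rw [hr]
        have hkj : ¬((k : Int) = j) := fun h => hjk h.symm
        simp [hkj]
    · simp only [hPj, if_false]
      have hkj : ¬((k:Int) = j ∧ P (k:Int) = true) := by
        rintro ⟨h1, h2⟩; rw [← h1] at hPj; exact hPj h2
      by_cases h1 : (k:Int) = j
      · simp [h1] at hPj ⊢; simp [hPj]
      · simp [h1]

lemma pvSetGet (m : List (List Int)) {i : Int} (hi : 0 ≤ i) :
    PySem.List.pySetD m i (PySem.List.pyGetD m i []) = m := by
  rw [PySem.List.pySetD_of_nonneg _ _ hi, PySem.List.pyGetD_of_nonneg _ _ hi]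
  by_cases h : i.toNat < m.length
  · rw [List.getD_eq_getElem m [] h]; exact List.set_getElem_self h
  · exact List.set_eq_of_length_le (by omega)

lemma pvGetSet (m : List (List Int)) {i : Int} (hi : 0 ≤ i) (j v : Int) :
    PySem.List.pyGetD (PySem.List.pySetD m i (PySem.List.pySetD (PySem.List.pyGetD m i []) j v)) i []
      = PySem.List.pySetD (PySem.List.pyGetD m i []) j v := by
  rw [PySem.List.pySetD_of_nonneg _ _ hi, PySem.List.pyGetD_of_nonneg _ _ hi,
      PySem.List.pyGetD_of_nonneg _ _ hi]
  by_cases h : i.toNat < m.length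
  · simp [List.getD, List.getElem?_set, h]
  · rw [List.getD_eq_default m [] (by omega), pvSetD_nil, List.set_eq_of_length_le (by omega),
        List.getD_eq_default m [] (by omega)]

lemma pvSetSet (m : List (List Int)) {i : Int} (hi : 0 ≤ i) (a b : List Int) :
    PySem.List.pySetD (PySem.List.pySetD m i a) i b = PySem.List.pySetD m i b := by
  rw [PySem.List.pySetD_of_nonneg _ _ hi, PySem.List.pySetD_of_nonneg _ _ hi,
      PySem.List.pySetD_of_nonneg _ _ hi, List.set_set]

lemma pvMatStep (A S : List Int) {i : Int} (hi : 0 ≤ i) (L : List Int) (m : List (List Int)) :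
    L.foldl (fun m j =>
      if i ≠ j then
        if is_in_set (PySem.List.pyGetD A j 0 - PySem.List.pyGetD A i 0) S then
          PySem.List.pySetD m i (PySem.List.pySetD (PySem.List.pyGetD m i []) j 1)
        else m
      else m) m
    = PySem.List.pySetD m i
        (pvFill (fun j => decide (i ≠ j) && is_in_set (PySem.List.pyGetD A j 0 - PySem.List.pyGetD A i 0) S)
          L (PySem.List.pyGetD m i [])) := by
  induction L generalizing m with
  | nil => simp [pvFill, pvSetGet m hi]
  | cons j L ih =>
    simp only [List.foldl_cons, pvFill] at *
    by_cases hij : i ≠ j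
    · by_cases hb : is_in_set (PySem.List.pyGetD A j 0 - PySem.List.pyGetD A i 0) S = true
      · rw [if_pos hij, if_pos hb, ih, pvGetSet m hi, pvSetSet m hi]
        have hC : (decide (i ≠ j) && is_in_set (PySem.List.pyGetD A j 0 - PySem.List.pyGetD A i 0) S) = true := by
          simp [hij, hb]
        simp only [hC]
        simp
      · rw [if_pos hij, if_neg hb, ih]
        have hC : (decide (i ≠ j) && is_in_set (PySem.List.pyGetD A j 0 - PySem.List.pyGetD A i 0) S) = false := by
          simp [hb]
        simp only [hC]
        simp
    · rw [if_neg hij, ih]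
      have hC : (decide (i ≠ j) && is_in_set (PySem.List.pyGetD A j 0 - PySem.List.pyGetD A i 0) S) = false := by
        simp at hij; simp [hij]
      simp only [hC]
      simp

lemma pvRowwise (g : Int → List Int → List Int) (m0 : List (List Int)) (k : Nat) (hk : k ≤ m0.length) :
    (PySem.List.pyRange 0 (k : Int) 1).foldl
      (fun m i => PySem.List.pySetD m i (g i (PySem.List.pyGetD m i []))) m0
    = ((List.range k).map (fun (t : Nat) => g ((t : Int)) (List.getD m0 t []))) ++ m0.drop k := by
  induction k with
  | zero => simp [PySem.List.pyRange_one_eq_nil]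
  | succ k ih =>
    have hk' : k ≤ m0.length := by omega
    have hkl : k < m0.length := by omega
    have hcast : ((k : Int) + 1) = (((k + 1 : Nat)) : Int) := by push_cast; ring
    rw [← hcast, PySem.List.pyRange_one_succ_right (by positivity), List.foldl_append, ih hk']
    simp only [List.foldl_cons, List.foldl_nil]
    have hplen : ((List.range k).map (fun (t : Nat) => g ((t : Int)) (List.getD m0 t []))).length = k := by
      simp
    have hdrop : m0.drop k = m0[k] :: m0.drop (k + 1) := List.drop_eq_getElem_cons hkl
    rw [PySem.List.pyGetD_of_nonneg _ _ (by positivity), PySem.List.pySetD_of_nonneg _ _ (by positivity)]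
    rw [Int.toNat_natCast]
    rw [hdrop]
    rw [List.getD_eq_getElem _ _ (by simp [hplen]; omega)]
    rw [List.getElem_append_right (by omega)]
    simp only [hplen, Nat.sub_self, List.getElem_cons_zero]
    rw [List.set_append_right _ _ (by omega)]
    simp only [hplen, Nat.sub_self, List.set_cons_zero]
    rw [List.range_succ, List.map_append]
    simp [List.getD_eq_getElem m0 [] hkl, List.getElem?_eq_getElem hkl]

lemma pvRowA (A S : List Int) (i : Nat) :
    pvFill (fun j => decide ((i : Int) ≠ j) && is_in_set (PySem.List.pyGetD A j 0 - PySem.List.pyGetD A (i : Int) 0) S)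
      (PySem.List.pyRange 0 ((A.length : Int)) 1) (List.replicate A.length (0 : Int))
    = (List.range A.length).map (fun k => pvEntry A S i k) := by
  apply List.ext_getElem?
  intro k
  rw [pvFill_getElem? _ _ (fun j hj => ((PySem.List.mem_pyRange_one).mp hj).1)]
  simp only [List.length_replicate, List.getElem?_replicate, List.getElem?_map, List.getElem?_range]
  by_cases hk : k < A.length
  · have hex : (∃ j ∈ PySem.List.pyRange 0 ((A.length : Int)) 1,
        (decide ((i : Int) ≠ j) && is_in_set (PySem.List.pyGetD A j 0 - PySem.List.pyGetD A (i : Int) 0) S) = true ∧ j = (k : Int))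
      ↔ (i ≠ k ∧ (A.getD k 0 - A.getD i 0) ∈ S) := by
      constructor
      · rintro ⟨j, hjmem, hP, rfl⟩
        simp only [Bool.and_eq_true, decide_eq_true_eq] at hP
        refine ⟨fun h => hP.1 (by exact_mod_cast h), ?_⟩
        have := hP.2
        simp only [is_in_set, List.contains_iff_mem] at this
        rwa [PySem.List.pyGetD_natCast, PySem.List.pyGetD_natCast] at this
      · rintro ⟨h1, h2⟩
        refine ⟨(k : Int), PySem.List.mem_pyRange_one.mpr ⟨by positivity, by exact_mod_cast hk⟩, ?_, rfl⟩
        simp only [Bool.and_eq_true, decide_eq_true_eq]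
        refine ⟨fun h => h1 (by exact_mod_cast h), ?_⟩
        simp only [is_in_set, List.contains_iff_mem]
        rwa [PySem.List.pyGetD_natCast, PySem.List.pyGetD_natCast]
    by_cases hc : i ≠ k ∧ (A.getD k 0 - A.getD i 0) ∈ S <;>
      (simp [hex, hc, hk, pvEntry, is_in_set, List.contains_iff_mem]; try (split_ifs <;> rfl))
  · simp [hk]
lemma pvA_eq_spec (A S : List Int) : create_adjacency_matrix A S = pvSpec A S := by
  unfold create_adjacency_matrix
  simp only [PySem.List.len_eq]
  rw [PySem.List.foldl_append_singleton_eq_map (f := fun (_ : Int) => (0:Int))]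
  rw [PySem.List.foldl_append_singleton_eq_map
      (f := fun (_ : Int) => [] ++ (PySem.List.pyRange 0 ((A.length:Int)) 1).map (fun _ => (0:Int)))]
  simp only [List.nil_append, List.map_const', PySem.List.length_pyRange_one]
  have hz : ((A.length:Int) - 0).toNat = A.length := by omega
  rw [hz]
  -- replace the fill loop body using pvMatStep, then pvRowwise
  rw [PySem.List.foldl_congr_mem (PySem.List.pyRange 0 ((A.length:Int)) 1) _
      (fun m i => PySem.List.pySetD m i
        (pvFill (fun j => decide (i ≠ j) && is_in_set (PySem.List.pyGetD A j 0 - PySem.List.pyGetD A i 0) S)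
          (PySem.List.pyRange 0 ((A.length:Int)) 1) (PySem.List.pyGetD m i [])))
      (List.replicate A.length (List.replicate A.length 0))
      (fun m i hi => pvMatStep A S ((PySem.List.mem_pyRange_one).mp hi).1 _ m)]
  rw [pvRowwise _ _ A.length (by simp)]
  simp only [List.getD_replicate, List.drop_replicate, Nat.sub_self, List.replicate_zero, List.append_nil]
  unfold pvSpec
  apply List.map_congr_left
  intro t ht
  rw [List.mem_range] at ht
  rw [show (List.replicate A.length (List.replicate A.length (0:Int))).getD t [] = List.replicate A.length 0 from by
    rw [List.getD_eq_getElem _ _ (by simpa using ht)]; simp]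
  exact pvRowA A S t
lemma pvPos_getD (ps : List (Int × Int)) (d : PySem.Dict Int (List Int)) (v : Int) :
    PySem.Dict.getD (ps.foldl (fun d p => PySem.Dict.modify d p.2 [] (fun l => l ++ [p.1])) d) v []
      = PySem.Dict.getD d v [] ++ (ps.filter (fun p => p.2 == v)).map (·.1) := by
  induction ps generalizing d with
  | nil => simp
  | cons p ps ih =>
    simp only [List.foldl_cons, List.filter_cons]
    rw [ih]
    by_cases hv : p.2 = v
    · rw [show (PySem.Dict.modify d p.2 [] (fun l => l ++ [p.1])).getD v []
            = d.getD v [] ++ [p.1] from by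
        rw [← hv]; exact PySem.Dict.getD_modify_self d p.2 [] _]
      simp [hv]
    · rw [PySem.Dict.getD_modify_of_ne d [] _ (fun h => hv h.symm)]
      simp [hv]

lemma pvDict_empty_getD (v : Int) :
    PySem.Dict.getD (PySem.Dict.empty : PySem.Dict Int (List Int)) v [] = [] := by
  simp [PySem.Dict.getD, PySem.Dict.empty, PySem.Dict.get?]

lemma pvRowB (A S : List Int) (i : Nat) (hi : i < A.length) :
    S.foldl (fun r s =>
        (PySem.Dict.getD ((PySem.List.enumerate A 0).foldl
            (fun d p => PySem.Dict.modify d p.2 [] (fun l => l ++ [p.1])) PySem.Dict.empty)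
          (A.getD i 0 + s) []).foldl
          (fun r j => if j ≠ (i : Int) then PySem.List.pySetD r j 1 else r) r)
      (PySem.List.pyRepeat [(0 : Int)] ((A.length : Int)))
    = (List.range A.length).map (fun k => pvEntry A S i k) := by
  have hposL : ∀ v : Int,
      PySem.Dict.getD ((PySem.List.enumerate A 0).foldl
          (fun d p => PySem.Dict.modify d p.2 [] (fun l => l ++ [p.1])) PySem.Dict.empty) v []
        = ((PySem.List.enumerate A 0).filter (fun p => p.2 == v)).map (·.1) := by
    intro v
    rw [pvPos_getD, pvDict_empty_getD, List.nil_append]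
  have hmem : ∀ (v j : Int),
      (j ∈ ((PySem.List.enumerate A 0).filter (fun p => p.2 == v)).map (·.1))
        ↔ ∃ k : Nat, k < A.length ∧ (k : Int) = j ∧ A.getD k 0 = v := by
    intro v j
    simp only [List.mem_map, List.mem_filter, PySem.List.mem_enumerate_iff]
    constructor
    · rintro ⟨p, ⟨⟨k, hk, rfl⟩, hv⟩, rfl⟩
      simp only [beq_iff_eq] at hv
      exact ⟨k, hk, by simp, by rw [List.getD_eq_getElem _ _ hk]; simpa using hv⟩
    · rintro ⟨k, hk, rfl, hv⟩
      refine ⟨((k : Int), A[k]), ⟨⟨k, hk, by simp⟩, ?_⟩, rfl⟩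
      simp only [beq_iff_eq]
      rw [List.getD_eq_getElem _ _ hk] at hv
      exact hv
  -- collapse the two nested loops into one loop over the concatenation
  rw [← List.foldl_flatMap]
  rw [PySem.List.foldl_congr_mem _ _
      (fun (r : List Int) (j : Int) => if (decide (j ≠ (i : Int))) = true then PySem.List.pySetD r j 1 else r) _
      (by intro r j _; by_cases h : j = (i : Int) <;> simp [h])]
  have hL : ∀ j ∈ S.flatMap (fun s =>
      PySem.Dict.getD ((PySem.List.enumerate A 0).foldl
          (fun d p => PySem.Dict.modify d p.2 [] (fun l => l ++ [p.1])) PySem.Dict.empty)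
        (A.getD i 0 + s) []), 0 ≤ j := by
    intro j hj
    rw [List.mem_flatMap] at hj
    obtain ⟨s, _, hj⟩ := hj
    rw [hposL, hmem] at hj
    obtain ⟨k, _, rfl, _⟩ := hj
    positivity
  rw [PySem.List.pyRepeat_singleton]
  have hlen : ((A.length : Int)).toNat = A.length := by omega
  rw [hlen]
  apply List.ext_getElem?
  intro k
  rw [show (List.foldl (fun (r : List Int) (j : Int) => if (decide (j ≠ (i : Int))) = true then PySem.List.pySetD r j 1 else r)
        (List.replicate A.length 0) (S.flatMap fun s =>
          PySem.Dict.getD ((PySem.List.enumerate A 0).foldl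
            (fun d p => PySem.Dict.modify d p.2 [] (fun l => l ++ [p.1])) PySem.Dict.empty)
          (A.getD i 0 + s) []))
      = pvFill (fun j => decide (j ≠ (i : Int)))
          (S.flatMap fun s =>
            PySem.Dict.getD ((PySem.List.enumerate A 0).foldl
              (fun d p => PySem.Dict.modify d p.2 [] (fun l => l ++ [p.1])) PySem.Dict.empty)
            (A.getD i 0 + s) []) (List.replicate A.length 0) from rfl]
  rw [pvFill_getElem? _ _ hL]
  by_cases hk : k < A.length
  · have hex : (∃ j ∈ S.flatMap (fun s =>
        PySem.Dict.getD ((PySem.List.enumerate A 0).foldl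
          (fun d p => PySem.Dict.modify d p.2 [] (fun l => l ++ [p.1])) PySem.Dict.empty)
        (A.getD i 0 + s) []), (decide (j ≠ (i : Int))) = true ∧ j = (k : Int))
      ↔ (i ≠ k ∧ (A.getD k 0 - A.getD i 0) ∈ S) := by
      constructor
      · rintro ⟨j, hjm, hP, rfl⟩
        rw [List.mem_flatMap] at hjm
        obtain ⟨s, hs, hj⟩ := hjm
        rw [hposL, hmem] at hj
        obtain ⟨k', _, hk', hv⟩ := hj
        have hkk : k' = k := by exact_mod_cast hk'
        rw [hkk] at hv
        simp only [decide_eq_true_eq] at hP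
        refine ⟨fun h => hP (by exact_mod_cast h.symm), ?_⟩
        have hsv : A.getD k 0 - A.getD i 0 = s := by omega
        rwa [hsv]
      · rintro ⟨h1, h2⟩
        refine ⟨(k : Int), ?_, by simpa using fun h => h1 (by exact_mod_cast h.symm), rfl⟩
        rw [List.mem_flatMap]
        refine ⟨A.getD k 0 - A.getD i 0, h2, ?_⟩
        rw [hposL, hmem]
        exact ⟨k, hk, rfl, by omega⟩
    have hcond : ((∃ j ∈ S.flatMap (fun s =>
        PySem.Dict.getD ((PySem.List.enumerate A 0).foldl
          (fun d p => PySem.Dict.modify d p.2 [] (fun l => l ++ [p.1])) PySem.Dict.empty)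
        (A.getD i 0 + s) []), (decide (j ≠ (i : Int))) = true ∧ j = (k : Int))
        ∧ k < (List.replicate A.length (0 : Int)).length)
      ↔ (i ≠ k ∧ (A.getD k 0 - A.getD i 0) ∈ S) := by
      rw [List.length_replicate]
      exact ⟨fun ⟨h, _⟩ => hex.mp h, fun h => ⟨hex.mpr h, hk⟩⟩
    rw [if_congr hcond rfl rfl]
    have hrhs : (((List.range A.length).map (fun k => pvEntry A S i k)))[k]? = some (pvEntry A S i k) := by
      simp [List.getElem?_map, List.getElem?_range, hk]
    rw [hrhs, List.getElem?_replicate]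
    simp only [hk, if_true]
    unfold pvEntry
    split_ifs <;> rfl
  · simp [hk]
lemma pvB_eq_spec (A S : List Int) : create_adjacency_matrix_alt A S = pvSpec A S := by
  unfold create_adjacency_matrix_alt
  simp only [PySem.List.len_eq]
  set pos := (PySem.List.enumerate A 0).foldl
      (fun d p => PySem.Dict.modify d p.2 [] (fun l => l ++ [p.1])) PySem.Dict.empty with hpos
  rw [PySem.List.foldl_append_singleton_eq_map, List.nil_append]
  rw [PySem.List.enumerate_eq_map_pyRange (d := 0), List.map_map]
  rw [PySem.List.pyRange_one, List.map_map]
  simp only [PySem.List.len_eq]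
  have hz : ((A.length : Int) - 0).toNat = A.length := by omega
  rw [hz]
  unfold pvSpec
  apply List.map_congr_left
  intro t ht
  rw [List.mem_range] at ht
  simp only [Function.comp_apply, zero_add, PySem.List.pyGetD_natCast]
  rw [hpos]
  exact pvRowB A S t ht

-- ===== VERDICT (by name: the statement is the Claim_ definition above) =====
theorem create_adjacency_matrix_spec : Claim_equal_create_adjacency_matrix := by
  intro A S _
  unfold Spec_create_adjacency_matrix
  rw [pvA_eq_spec, pvB_eq_spec]
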